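-- pv_equiv track=rewrite | github.com/MuyleangIng/MekongTunnel | mekong-tunnel/src/mekong_tunnel/detect_port.py | detect_port
-- ===== SOURCE A (Python) =====
-- FRAMEWORK_PORTS = {
--     'uvicorn':   8000,
--     'gunicorn':  8000,
--     'hypercorn': 8000,
--     'granian':   8000,
--     'daphne':    8000,
--     'flask':     5000,
--     'manage.py': 8000,
--     'fastapi':   8000,
--     'tornado':   8888,
-- }
--
-- def detect_port(args: list) -> 'int | None':
--     """
--     Scan args for an explicit port, then fall back to framework defaults.
--
--     Recognised patterns:
--       --port N
--       -p N
--       --bind HOST:N  (gunicorn / hypercorn style)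
--       bare 4-5 digit integer anywhere in args
--       trailing HOST:PORT token  (e.g. manage.py runserver 0.0.0.0:8000)
--
--     Returns an int or None.
--     """
--     i = 0
--     bare_candidate = None
--
--     while i < len(args):
--         token = args[i]
--
--         # --port N  /  -p N
--         if token in ('--port', '-p') and i + 1 < len(args):
--             try:
--                 return int(args[i + 1])
--             except ValueError:
--                 pass
--
--         # --port=N
--         if token.startswith('--port='):
--             try:
--                 return int(token.split('=', 1)[1])
--             except ValueError:
--                 pass
--
--         # --bind HOST:PORT  (gunicorn / hypercorn)
--         if token in ('--bind', '-b') and i + 1 < len(args):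
--             val = args[i + 1]
--             if ':' in val:
--                 try:
--                     return int(val.rsplit(':', 1)[1])
--                 except ValueError:
--                     pass
--
--         # --bind=HOST:PORT
--         if token.startswith('--bind='):
--             val = token.split('=', 1)[1]
--             if ':' in val:
--                 try:
--                     return int(val.rsplit(':', 1)[1])
--                 except ValueError:
--                     pass
--
--         # HOST:PORT bare token  (e.g. 0.0.0.0:8000  or  just :8000)
--         if ':' in token and not token.startswith('-'):
--             try:
--                 port_part = int(token.rsplit(':', 1)[1])
--                 if 1024 <= port_part <= 65535:
--                     bare_candidate = port_part
--             except ValueError: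
--                 pass
--
--         # bare 4-5 digit integer
--         if token.isdigit() and 4 <= len(token) <= 5:
--             try:
--                 port_val = int(token)
--                 if 1024 <= port_val <= 65535:
--                     bare_candidate = port_val
--             except ValueError:
--                 pass
--
--         i += 1
--
--     if bare_candidate is not None:
--         return bare_candidate
--
--     # Fall back to framework default
--     if args:
--         first = args[0]
--         if first in FRAMEWORK_PORTS:
--             return FRAMEWORK_PORTS[first]
--         # e.g. args = ['python', 'manage.py', ...]
--         for token in args:
--             basename = token.split('/')[-1].split('\\')[-1]
--             if basename in FRAMEWORK_PORTS:
--                 return FRAMEWORK_PORTS[basename]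
--
--     return None
-- ===== SOURCE B (Python) =====
-- FRAMEWORK_PORTS = {
--     'uvicorn':   8000,
--     'gunicorn':  8000,
--     'hypercorn': 8000,
--     'granian':   8000,
--     'daphne':    8000,
--     'flask':     5000,
--     'manage.py': 8000,
--     'fastapi':   8000,
--     'tornado':   8888,
-- }
--
--
-- def _toint(s):
--     try:
--         return int(s)
--     except ValueError:
--         return None
--
--
-- def _explicit(tok, nxt):
--     """Explicit-port patterns for one token (nxt = following token or None)."""
--     if tok in ('--port', '-p') and nxt is not None:
--         v = _toint(nxt)
--         if v is not None:
--             return v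
--     if tok.startswith('--port='):
--         v = _toint(tok.split('=', 1)[1])
--         if v is not None:
--             return v
--     if tok in ('--bind', '-b') and nxt is not None and ':' in nxt:
--         v = _toint(nxt.rsplit(':', 1)[1])
--         if v is not None:
--             return v
--     if tok.startswith('--bind='):
--         val = tok.split('=', 1)[1]
--         if ':' in val:
--             v = _toint(val.rsplit(':', 1)[1])
--             if v is not None:
--                 return v
--     return None
--
--
-- def _bare(tok):
--     """Bare-port patterns for one token, with the 1024..65535 filter."""
--     if tok.isdigit() and 4 <= len(tok) <= 5:
--         v = int(tok)
--         if 1024 <= v <= 65535: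
--             return v
--     if ':' in tok and not tok.startswith('-'):
--         v = _toint(tok.rsplit(':', 1)[1])
--         if v is not None and 1024 <= v <= 65535:
--             return v
--     return None
--
--
-- def _default(args):
--     """Framework-default fallback: first arg exact, then first basename hit."""
--     if not args:
--         return None
--     if args[0] in FRAMEWORK_PORTS:
--         return FRAMEWORK_PORTS[args[0]]
--     hits = [FRAMEWORK_PORTS[b] for t in args
--             if (b := t.split('/')[-1].split('\\')[-1]) in FRAMEWORK_PORTS]
--     return hits[0] if hits else None
--
--
-- def detect_port(args: list) -> 'int | None':
--     # Pass 1: leftmost explicit port wins.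
--     for i, tok in enumerate(args):
--         v = _explicit(tok, args[i + 1] if i + 1 < len(args) else None)
--         if v is not None:
--             return v
--     # Pass 2: rightmost bare port wins -> scan from the right, first hit.
--     for tok in reversed(args):
--         v = _bare(tok)
--         if v is not None:
--             return v
--     return _default(args)
-- ===== Notes on version B (the rewrite author's own statement) =====
-- stated objective: alternative
-- what changed: A's single stateful while-loop (early returns interleaved with a bare_candidate accumulator and a trailing fallback) is decomposed into three independent passes: a left-to-right scan for the first explicit --port/-p/--bind pattern, a right-to-left scan returning the first bare HOST:PORT or 4-5 digit token in 1024..65535 (replacing the last-wins accumulator), then the framework-default fallback.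
import Mathlib
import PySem

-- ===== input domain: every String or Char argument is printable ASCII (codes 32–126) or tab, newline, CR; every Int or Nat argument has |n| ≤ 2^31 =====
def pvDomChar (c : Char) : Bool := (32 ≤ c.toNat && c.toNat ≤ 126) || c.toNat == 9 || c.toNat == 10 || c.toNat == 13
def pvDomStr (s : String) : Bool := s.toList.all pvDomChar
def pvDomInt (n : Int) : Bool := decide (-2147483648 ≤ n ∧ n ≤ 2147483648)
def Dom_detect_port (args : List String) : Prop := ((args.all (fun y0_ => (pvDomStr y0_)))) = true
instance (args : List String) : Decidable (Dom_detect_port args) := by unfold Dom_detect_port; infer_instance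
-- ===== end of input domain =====

-- B restructures A's single stateful scan into three separate passes (leftmost explicit port, then
-- rightmost bare port via a reversed scan, then the framework-default fallback); same results, no speed claim.

-- Shared exact ports of Python phrases used verbatim by BOTH sources:
-- int(val.rsplit(':', 1)[1]) — only ever evaluated under the guard ':' in val, where
-- rsplit(':', 1)[1] is exactly the substring after the last ':' (hand port, exact under that guard).
def afterColonInt? (val : String) : Option Int :=
  PySem.Int.ofChars? ((val.toList.reverse.takeWhile (fun c => c ≠ ':')).reverse)

-- tok.split('=', 1)[1] — only ever evaluated under a startswith guard that guarantees '=' occurs,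
-- so the split has a second component (the getD defaults are unreachable).
def eqTail (tok : String) : String :=
  ((PySem.Str.splitMax? tok "=" 1).getD []).getD 1 ""

-- token.split('/')[-1].split('\\')[-1] (split never returns an empty list, so getLastD is exact)
def basename (tok : String) : String :=
  ((PySem.Str.split? (((PySem.Str.split? tok "/").getD []).getLastD "") "\\").getD []).getLastD ""

def FRAMEWORK_PORTS : List (String × Int) :=
  [("uvicorn", 8000), ("gunicorn", 8000), ("hypercorn", 8000), ("granian", 8000),
   ("daphne", 8000), ("flask", 5000), ("manage.py", 8000), ("fastapi", 8000), ("tornado", 8888)]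

-- ===== PORT A =====
-- A's while-loop: one pass over args with the bare_candidate accumulator; an explicit hit returns early.
def loopA : List String → Option Int → Option Int
  | [], bare => bare
  | tok :: rest, bare =>
    match (if tok = "--port" ∨ tok = "-p" then rest.head?.bind PySem.Int.ofStr? else none) with
    | some p => some p
    | none =>
    match (if PySem.Str.startswith tok "--port=" then PySem.Int.ofStr? (eqTail tok) else none) with
    | some p => some p
    | none =>
    match (if tok = "--bind" ∨ tok = "-b" then
             rest.head?.bind (fun val => if PySem.Str.isIn ":" val then afterColonInt? val else none)
           else none) with
    | some p => some p
    | none =>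
    match (if PySem.Str.startswith tok "--bind=" then
             (if PySem.Str.isIn ":" (eqTail tok) then afterColonInt? (eqTail tok) else none)
           else none) with
    | some p => some p
    | none =>
      let bare1 :=
        if PySem.Str.isIn ":" tok ∧ ¬ PySem.Str.startswith tok "-" then
          match afterColonInt? tok with
          | some p => if 1024 ≤ p ∧ p ≤ 65535 then some p else bare
          | none => bare
        else bare
      let bare2 :=
        if PySem.Str.strIsdigit tok ∧ 4 ≤ PySem.Str.len tok ∧ PySem.Str.len tok ≤ 5 then
          match PySem.Int.ofStr? tok with
          | some p => if 1024 ≤ p ∧ p ≤ 65535 then some p else bare1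
          | none => bare1
        else bare1
      loopA rest bare2

-- A's fallback for-loop over basenames
def scanA : List String → Option Int
  | [] => none
  | tok :: rest =>
    match List.lookup (basename tok) FRAMEWORK_PORTS with
    | some p => some p
    | none => scanA rest

def detect_port (args : List String) : Option Int :=
  match loopA args none with
  | some p => some p
  | none =>
    match args with
    | [] => none
    | first :: _ =>
      match List.lookup first FRAMEWORK_PORTS with
      | some p => some p
      | none => scanA args

-- ===== PORT B =====
-- _explicit(tok, nxt)
def explicit1 (tok : String) (nxt : Option String) : Option Int :=
  match (if tok = "--port" ∨ tok = "-p" then nxt.bind PySem.Int.ofStr? else none) with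
  | some v => some v
  | none =>
  match (if PySem.Str.startswith tok "--port=" then PySem.Int.ofStr? (eqTail tok) else none) with
  | some v => some v
  | none =>
  match (if tok = "--bind" ∨ tok = "-b" then
           nxt.bind (fun n => if PySem.Str.isIn ":" n then afterColonInt? n else none)
         else none) with
  | some v => some v
  | none =>
    if PySem.Str.startswith tok "--bind=" then
      (if PySem.Str.isIn ":" (eqTail tok) then afterColonInt? (eqTail tok) else none)
    else none

-- pass 1: first explicit hit, left to right
def explicitPass : List String → Option Int
  | [] => none
  | tok :: rest =>
    match explicit1 tok rest.head? with
    | some v => some v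
    | none => explicitPass rest

-- _bare(tok)
def bare1 (tok : String) : Option Int :=
  match (if PySem.Str.strIsdigit tok ∧ 4 ≤ PySem.Str.len tok ∧ PySem.Str.len tok ≤ 5 then
           (PySem.Int.ofStr? tok).bind (fun v => if 1024 ≤ v ∧ v ≤ 65535 then some v else none)
         else none) with
  | some v => some v
  | none =>
    if PySem.Str.isIn ":" tok ∧ ¬ PySem.Str.startswith tok "-" then
      (afterColonInt? tok).bind (fun v => if 1024 ≤ v ∧ v ≤ 65535 then some v else none)
    else none

-- pass 2: first bare hit over the REVERSED list
def barePass : List String → Option Int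
  | [] => none
  | tok :: rest =>
    match bare1 tok with
    | some v => some v
    | none => barePass rest

-- _default(args)
def defaultB (args : List String) : Option Int :=
  match args with
  | [] => none
  | first :: _ =>
    match List.lookup first FRAMEWORK_PORTS with
    | some p => some p
    | none =>
      (args.filterMap (fun t => List.lookup (basename t) FRAMEWORK_PORTS)).head?

def detect_port_alt (args : List String) : Option Int :=
  match explicitPass args with
  | some v => some v
  | none =>
  match barePass args.reverse with
  | some v => some v
  | none => defaultB args

-- ===== PRECONDITION & SPEC =====
def Spec_detect_port (args : List String) (out : Option Int) : Prop := out = detect_port_alt args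
instance (args : List String) (out : Option Int) : Decidable (Spec_detect_port args out) := by unfold Spec_detect_port; infer_instance

-- ===== CLAIM (what is proved, stated in full; the proofs are below) =====
def Claim_equal_detect_port : Prop := ∀ (args : List String), Dom_detect_port args → Spec_detect_port args (detect_port args)

-- ===== LEMMAS AND PROOFS =====

-- A's per-token bare_candidate update is exactly "first of B's _bare(tok), else the old candidate".
lemma bare_step (tok : String) (b : Option Int) :
    (let bare1 :=
        if PySem.Str.isIn ":" tok ∧ ¬ PySem.Str.startswith tok "-" then
          match afterColonInt? tok with
          | some p => if 1024 ≤ p ∧ p ≤ 65535 then some p else b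
          | none => b
        else b
     if PySem.Str.strIsdigit tok ∧ 4 ≤ PySem.Str.len tok ∧ PySem.Str.len tok ≤ 5 then
          match PySem.Int.ofStr? tok with
          | some p => if 1024 ≤ p ∧ p ≤ 65535 then some p else bare1
          | none => bare1
        else bare1) =
    (match bare1 tok with | some v => some v | none => b) := by
  simp only [bare1]
  by_cases hd : PySem.Str.strIsdigit tok ∧ 4 ≤ PySem.Str.len tok ∧ PySem.Str.len tok ≤ 5 <;>
    by_cases hc : PySem.Str.isIn ":" tok ∧ ¬ PySem.Str.startswith tok "-" <;>
      simp only [hd, hc, if_neg, not_false_iff] <;>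
        cases PySem.Int.ofStr? tok <;> cases afterColonInt? tok <;>
          simp [Option.bind] <;> split_ifs <;> simp

-- A's loop step: explicit checks of the head token, else recurse with the updated candidate.
lemma loopA_cons (tok : String) (rest : List String) (b : Option Int) :
    loopA (tok :: rest) b =
      (match explicit1 tok rest.head? with
       | some v => some v
       | none => loopA rest (match bare1 tok with | some v => some v | none => b)) := by
  rw [loopA, explicit1, ← bare_step tok b]
  cases (if tok = "--port" ∨ tok = "-p" then rest.head?.bind PySem.Int.ofStr? else none) with
  | some v => rfl
  | none =>
  cases (if PySem.Str.startswith tok "--port=" then PySem.Int.ofStr? (eqTail tok) else none) with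
  | some v => rfl
  | none =>
  cases (if tok = "--bind" ∨ tok = "-b" then
           rest.head?.bind (fun val => if PySem.Str.isIn ":" val then afterColonInt? val else none)
         else none) with
  | some v => rfl
  | none =>
  cases (if PySem.Str.startswith tok "--bind=" then
           (if PySem.Str.isIn ":" (eqTail tok) then afterColonInt? (eqTail tok) else none)
         else none) with
  | some v => rfl
  | none => rfl

lemma barePass_append (xs : List String) (t : String) :
    barePass (xs ++ [t]) =
      (match barePass xs with | some v => some v | none => bare1 t) := by
  induction xs with
  | nil => simp only [List.nil_append, barePass]; cases bare1 t <;> rfl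
  | cons x xs ih =>
    rw [List.cons_append, barePass, barePass, ih]
    cases bare1 x <;> simp

-- A's interleaved loop equals: first explicit hit, else first bare hit from the right, else the accumulator.
lemma loopA_eq (l : List String) (b : Option Int) :
    loopA l b =
      (match explicitPass l with
       | some v => some v
       | none => match barePass l.reverse with | some v => some v | none => b) := by
  induction l generalizing b with
  | nil => rfl
  | cons tok rest ih =>
    rw [loopA_cons, explicitPass, ih]
    have hrev : (tok :: rest).reverse = rest.reverse ++ [tok] := by simp
    rw [hrev, barePass_append]
    cases explicit1 tok rest.head? with
    | some v => rfl
    | none =>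
    cases explicitPass rest with
    | some v => rfl
    | none =>
    cases barePass rest.reverse <;> rfl

lemma scanA_eq (l : List String) :
    scanA l = (l.filterMap (fun t => List.lookup (basename t) FRAMEWORK_PORTS)).head? := by
  induction l with
  | nil => rfl
  | cons tok rest ih =>
    rw [scanA, List.filterMap_cons, ih]
    cases List.lookup (basename tok) FRAMEWORK_PORTS <;> simp

-- ===== VERDICT (by name: the statement is the Claim_ definition above) =====
theorem detect_port_spec : Claim_equal_detect_port := by
  intro args _
  unfold Spec_detect_port detect_port detect_port_alt defaultB
  rw [loopA_eq]
  cases explicitPass args with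
  | some v => rfl
  | none =>
  cases barePass args.reverse with
  | some v => rfl
  | none =>
  cases args with
  | nil => rfl
  | cons first rest =>
    cases hl : List.lookup first FRAMEWORK_PORTS <;> simp [hl, scanA_eq]
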